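-- pv_equiv track=rewrite | github.com/Setnr/carla-driving-simulator | PythonAPI/examples/h5.py | ConvertLabelFromCarla
-- ===== SOURCE A (Python) =====
-- def ConvertLabelFromCarla(label):
--     labelList = [10]
--     if label == 0:
--         return 11
--     for i in range(32):
--         NewLabel = 11
--         if int(label) >> i & 1:
--             i = i + 1 #Offset wegen der 0 damit Label 0 = 0 und label 1 = 1 muss beim bitshift 1 versetzt werden daher in carla selbst (tag - 1 in Radar.cpp)
--             if i == 14:
--                 NewLabel = 0
--             elif i == 15:
--                 NewLabel = 2
--             elif i == 16:
--                 NewLabel = 3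
--             elif i == 17:
--                 NewLabel = 4
--             elif i == 19:
--                 NewLabel = 5
--             elif i == 18:
--                 NewLabel = 6
--             elif i == 12:
--                 NewLabel = 8
--             elif i > 0 and i < 12:
--                 NewLabel = 10
--             else:
--                 NewLabel = 11
--             labelList.append(NewLabel)
--     return labelList[-1]
-- ===== SOURCE B (Python) =====
-- def ConvertLabelFromCarla(label):
--     if label == 0:
--         return 11
--     mask = int(label) % 0x100000000
--     if mask == 0:
--         return 10
--     n = mask.bit_length()
--     return {14: 0, 15: 2, 16: 3, 17: 4, 18: 6, 19: 5, 12: 8}.get(n, 10 if n < 12 else 11)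
-- ===== Notes on version B (the rewrite author's own statement) =====
-- stated objective: simpler
-- what changed: Replaced the per-bit scanning loop that appends candidate labels to a list with a direct computation: mask the label to its low word, take its bit_length (= highest set bit index plus A's offset), and look the result up in a small dict with a range-based fallback.
import Mathlib
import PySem

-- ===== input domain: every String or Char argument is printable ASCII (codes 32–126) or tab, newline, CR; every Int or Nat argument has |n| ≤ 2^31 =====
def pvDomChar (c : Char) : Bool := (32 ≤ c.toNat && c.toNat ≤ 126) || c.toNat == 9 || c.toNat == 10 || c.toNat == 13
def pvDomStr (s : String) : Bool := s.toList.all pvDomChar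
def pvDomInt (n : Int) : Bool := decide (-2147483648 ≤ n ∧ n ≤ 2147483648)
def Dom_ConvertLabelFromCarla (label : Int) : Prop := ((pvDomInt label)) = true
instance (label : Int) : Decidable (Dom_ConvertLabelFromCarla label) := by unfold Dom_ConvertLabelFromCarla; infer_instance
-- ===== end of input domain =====

-- B replaces A's per-bit scanning loop that appends to a list with a direct
-- highest-set-bit (bit_length) computation plus a table lookup (objective: simpler).


-- ===== PORT A =====
-- A-side helper: the loop-body test 'int(label) >> i & 1' (truthy iff nonzero);
-- i is drawn from range(32), so i ≥ 0 and 'i.toNat' is exact for Python's '>> i'.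
def pvBit (label i : Int) : Bool := PySem.Int.band (label >>> i.toNat) 1 != 0

-- A-side helper: the body computing NewLabel after the rebinding 'i = i + 1'.
def pvNewLabel (i0 : Int) : Int :=
  let i := i0 + 1
  if i = 14 then 0
  else if i = 15 then 2
  else if i = 16 then 3
  else if i = 17 then 4
  else if i = 19 then 5
  else if i = 18 then 6
  else if i = 12 then 8
  else if 0 < i ∧ i < 12 then 10
  else 11

def ConvertLabelFromCarla (label : Int) : Int :=
  -- labelList starts as [10]; the final labelList[-1] never raises (list nonempty)
  if label = 0 then 11
  else
    (PySem.List.pyGet?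
      ((PySem.List.pyRange 0 32 1).foldl
        (fun ll i => if pvBit label i then ll ++ [pvNewLabel i] else ll) [10])
      (-1)).getD 0

-- ===== PORT B =====
def ConvertLabelFromCarla_alt (label : Int) : Int :=
  if label = 0 then 11
  else
    let mask : Int := PySem.Int.mod label 4294967296
    if mask = 0 then 10
    else
      let n : Int := ((PySem.Int.bitLength mask : Nat) : Int)
      PySem.Dict.getD
        (PySem.Dict.ofList [((14 : Int), (0 : Int)), (15, 2), (16, 3), (17, 4), (18, 6), (19, 5), (12, 8)])
        n (if n < 12 then 10 else 11)

-- ===== PRECONDITION & SPEC =====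
def Spec_ConvertLabelFromCarla (label : Int) (out : Int) : Prop := out = ConvertLabelFromCarla_alt label
instance (label : Int) (out : Int) : Decidable (Spec_ConvertLabelFromCarla label out) := by unfold Spec_ConvertLabelFromCarla; infer_instance

-- ===== CLAIM (what is proved, stated in full; the proofs are below) =====
def Claim_equal_ConvertLabelFromCarla : Prop := ∀ (label : Int), Dom_ConvertLabelFromCarla label → Spec_ConvertLabelFromCarla label (ConvertLabelFromCarla label)

-- ===== LEMMAS AND PROOFS =====

-- bit j of label (j < 32) equals bit j of label mod 2^32
theorem pv_bit_mod (label : Int) (j : Nat) (hj : j < 32) :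
    (label / ((2 ^ j : Nat) : Int)) % 2 = (((label % 4294967296).toNat / 2 ^ j % 2 : Nat) : Int) := by
  set q : Int := label / 4294967296 with hq
  set m : Int := label % 4294967296 with hm
  have hmnn : 0 ≤ m := Int.emod_nonneg _ (by norm_num)
  have hdiv : 4294967296 * q + m = label := Int.mul_ediv_add_emod label 4294967296
  have hpow : ((2:Int)^j) * ((2:Int)^(32-j)) = 4294967296 := by
    rw [← pow_add]
    have : j + (32 - j) = 32 := by omega
    rw [this]; norm_num
  have hdecomp : label = m + ((2:Int)^j) * ((2:Int)^(32-j) * q) := by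
    rw [← mul_assoc, hpow]; linarith
  have hne : ((2:Int)^j) ≠ 0 := by positivity
  calc (label / ((2 ^ j : Nat) : Int)) % 2
      = ((m + ((2:Int)^j) * ((2:Int)^(32-j) * q)) / (2:Int)^j) % 2 := by
        rw [← hdecomp]; norm_cast
    _ = (m / (2:Int)^j + (2:Int)^(32-j) * q) % 2 := by
        rw [Int.add_mul_ediv_left _ _ hne]
    _ = (m / (2:Int)^j + 2 * ((2:Int)^(31-j) * q)) % 2 := by
        congr 1
        have : (2:Int)^(32-j) = 2 * (2:Int)^(31-j) := by
          rw [← pow_succ']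
          congr 1; omega
        rw [this]; ring
    _ = (m / (2:Int)^j) % 2 := by rw [Int.add_mul_emod_self_left]
    _ = (((label % 4294967296).toNat / 2 ^ j % 2 : Nat) : Int) := by
        rw [← hm]
        conv_lhs => rw [show m = ((m.toNat : Nat) : Int) from (Int.toNat_of_nonneg hmnn).symm]
        push_cast
        norm_num

-- pvBit in terms of the Nat bits of the mask
theorem pv_bit_iff (label : Int) (j : Nat) (hj : j < 32) :
    pvBit label (j : Int) = true ↔ (label % 4294967296).toNat / 2 ^ j % 2 = 1 := by
  unfold pvBit
  rw [Int.toNat_natCast, PySem.Int.band_one, PySem.Int.mod_eq_emod_of_pos (by norm_num),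
      Int.shiftRight_eq_div_pow, pv_bit_mod label j hj]
  rw [bne_iff_ne]
  constructor
  · intro h
    by_contra hcon
    exact h (by exact_mod_cast (by omega : ((label % 4294967296).toNat / 2 ^ j % 2 : Nat) = 0))
  · intro h
    rw [h]; norm_num

-- the scalar characterisation of A's loop result: the last element appended is the one
-- for the highest set bit k
theorem pvA_eq (label : Int) (k : Nat) (hk : k < 32)
    (hbit : pvBit label (k : Int) = true)
    (habove : ∀ j : Nat, k < j → j < 32 → pvBit label (j : Int) = false)
    (hne : label ≠ 0) :
    ConvertLabelFromCarla label = pvNewLabel (k : Int) := by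
  unfold ConvertLabelFromCarla
  rw [if_neg hne, PySem.List.foldl_append_if (pvBit label) pvNewLabel]
  have hsplit : PySem.List.pyRange 0 32 1 =
      PySem.List.pyRange 0 ((k : Int) + 1) 1 ++ PySem.List.pyRange ((k : Int) + 1) 32 1 :=
    PySem.List.pyRange_one_append 0 ((k : Int) + 1) 32 (by omega) (by exact_mod_cast hk)
  have hfilter2 : (PySem.List.pyRange ((k : Int) + 1) 32 1).filter (pvBit label) = [] := by
    rw [List.filter_eq_nil_iff]
    intro x hx
    rw [PySem.List.mem_pyRange_one] at hx
    have hxnn : 0 ≤ x := by omega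
    have hxeq : x = ((x.toNat : Nat) : Int) := (Int.toNat_of_nonneg hxnn).symm
    have h1 : k < x.toNat := by omega
    have h2 : x.toNat < 32 := by omega
    rw [hxeq, habove x.toNat h1 h2]
    exact Bool.false_ne_true
  have hfirst : PySem.List.pyRange 0 ((k : Int) + 1) 1 =
      PySem.List.pyRange 0 (k : Int) 1 ++ [(k : Int)] :=
    PySem.List.pyRange_one_succ_right (Int.natCast_nonneg k)
  rw [hsplit, List.filter_append, hfilter2, List.append_nil, hfirst, List.filter_append]
  have : List.filter (pvBit label) [(k : Int)] = [(k : Int)] := by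
    simp [hbit]
  rw [this, List.map_append, List.map_singleton, ← List.append_assoc,
      PySem.List.pyGet?_neg_one_append_singleton]
  rfl

-- the finite table check: A's if-chain at i = k+1 equals B's dict lookup at n = k+1
theorem pv_table (k : Nat) (hk : k < 32) :
    pvNewLabel (k : Int) =
      PySem.Dict.getD
        (PySem.Dict.ofList [((14 : Int), (0 : Int)), (15, 2), (16, 3), (17, 4), (18, 6), (19, 5), (12, 8)])
        ((k : Int) + 1) (if ((k : Int) + 1) < 12 then 10 else 11) := by
  revert hk; revert k; decide

-- ===== VERDICT (by name: the statement is the Claim_ definition above) =====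
theorem ConvertLabelFromCarla_spec : Claim_equal_ConvertLabelFromCarla := by
  intro label hdom
  unfold Spec_ConvertLabelFromCarla ConvertLabelFromCarla_alt
  by_cases h0 : label = 0
  · subst h0; decide
  rw [if_neg h0]
  have hdom' : -2147483648 ≤ label ∧ label ≤ 2147483648 := by
    have := hdom
    unfold Dom_ConvertLabelFromCarla pvDomInt at this
    exact of_decide_eq_true this
  have hmemod : PySem.Int.mod label 4294967296 = label % 4294967296 :=
    PySem.Int.mod_eq_emod_of_pos (by norm_num)
  have hmne : PySem.Int.mod label 4294967296 ≠ 0 := by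
    rw [hmemod]
    intro hzero
    rcases Int.dvd_of_emod_eq_zero hzero with ⟨c, hc⟩
    omega
  rw [if_neg hmne]
  set m : Int := PySem.Int.mod label 4294967296 with hmdef
  have hmnn : 0 ≤ m := by rw [hmemod]; exact Int.emod_nonneg _ (by norm_num)
  have hnpos : PySem.Int.bitLength m ≠ 0 := by
    intro h
    have := PySem.Int.lt_two_pow_bitLength m
    rw [h] at this
    simp at this
    exact hmne (by omega)
  set k : Nat := PySem.Int.bitLength m - 1 with hkdef
  have hnk : PySem.Int.bitLength m = k + 1 := by omega
  have hlow : 2 ^ k ≤ m.toNat := by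
    have h := PySem.Int.two_pow_bitLength_le m hmne
    rw [← hkdef] at h
    omega
  have hhigh : m.toNat < 2 ^ (k + 1) := by
    have := PySem.Int.lt_two_pow_bitLength m
    rw [hnk] at this
    omega
  have hmlt : m.toNat < 2 ^ 32 := by
    have : m < 4294967296 := by
      rw [hmemod]
      exact Int.emod_lt_of_pos _ (by norm_num)
    omega
  have hk32 : k < 32 := by
    by_contra hcon
    have : (2:Nat) ^ 32 ≤ 2 ^ k := Nat.pow_le_pow_right (by norm_num) (by omega)
    omega
  have hbit : pvBit label (k : Int) = true := by
    rw [pv_bit_iff label k hk32, ← hmemod]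
    have hp : (0:Nat) < 2 ^ k := Nat.pow_pos (by norm_num)
    have hps : (2:Nat) ^ (k + 1) = 2 * 2 ^ k := by rw [pow_succ]; ring
    have h1 : 1 ≤ m.toNat / 2 ^ k := (Nat.le_div_iff_mul_le hp).2 (by omega)
    have h2 : m.toNat / 2 ^ k < 2 := (Nat.div_lt_iff_lt_mul hp).2 (by omega)
    omega
  have habove : ∀ j : Nat, k < j → j < 32 → pvBit label (j : Int) = false := by
    intro j hkj hj32
    rw [Bool.eq_false_iff]
    intro hcon
    rw [pv_bit_iff label j hj32, ← hmemod] at hcon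
    have : m.toNat < 2 ^ j :=
      lt_of_lt_of_le hhigh (Nat.pow_le_pow_right (by norm_num) (by omega))
    rw [Nat.div_eq_of_lt this] at hcon
    omega
  rw [pvA_eq label k hk32 hbit habove h0, pv_table k hk32, hnk]
  push_cast
  ring_nf
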